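-- pv_equiv track=rewrite | github.com/LLNL/FPChecker | tests/llvm/dynamic/test_warnings_dont_abort/test_warnings_dont_abort.py | checkForErrorReports
-- ===== SOURCE A (Python) =====
-- def checkForErrorReports(out):
--     ret = False
--     firstLine = False
--     secondLine = False
--     thirdLine = False
--     for l in out:
--         if "#FPCHECKER: Warning at dot_product.cu:6" in l:
--             firstLine = True
--         if "#FPCHECKER: Warning at dot_product.cu:8" in l:
--             secondLine = True
--         if "#FPCHECKER: Warning at dot_product.cu:18" in l:
--             thirdLine = True
--     return (firstLine and secondLine and thirdLine)
-- ===== SOURCE B (Python) =====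
-- def checkForErrorReports(out):
--     lines = list(out)
--     targets = [
--         "#FPCHECKER: Warning at dot_product.cu:6",
--         "#FPCHECKER: Warning at dot_product.cu:8",
--         "#FPCHECKER: Warning at dot_product.cu:18",
--     ]
--     return all(any(t in l for l in lines) for t in targets)
-- ===== Notes on version B (the rewrite author's own statement) =====
-- stated objective: idiomatic
-- what changed: Replaced the single pass that accumulates three boolean flags with a list of target substrings checked by all(any(t in l for l in lines)), i.e. three independent short-circuiting scans over the materialized lines.
import Mathlib
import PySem

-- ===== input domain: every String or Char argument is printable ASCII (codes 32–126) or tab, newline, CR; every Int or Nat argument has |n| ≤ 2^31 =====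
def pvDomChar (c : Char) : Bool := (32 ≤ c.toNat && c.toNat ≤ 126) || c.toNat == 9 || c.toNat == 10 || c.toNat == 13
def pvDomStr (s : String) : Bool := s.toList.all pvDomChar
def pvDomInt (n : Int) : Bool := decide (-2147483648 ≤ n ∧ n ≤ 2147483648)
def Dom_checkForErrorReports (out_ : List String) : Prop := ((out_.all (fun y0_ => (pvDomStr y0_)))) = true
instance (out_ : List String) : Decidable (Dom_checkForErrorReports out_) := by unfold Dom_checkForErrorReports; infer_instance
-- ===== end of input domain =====

-- B materializes the three warning substrings as a target list and checks all(any(t in l)) per target — idiomatic decomposition, same cost as A.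


-- ===== PORT A =====
def checkForErrorReports (out_ : List String) : Bool :=
  let st := out_.foldl
    (fun (st : Bool × Bool × Bool) l =>
      let st := if PySem.Str.isIn "#FPCHECKER: Warning at dot_product.cu:6" l then (true, st.2.1, st.2.2) else st
      let st := if PySem.Str.isIn "#FPCHECKER: Warning at dot_product.cu:8" l then (st.1, true, st.2.2) else st
      let st := if PySem.Str.isIn "#FPCHECKER: Warning at dot_product.cu:18" l then (st.1, st.2.1, true) else st
      st)
    (false, false, false)
  st.1 && st.2.1 && st.2.2

-- ===== PORT B =====
def pvTargets : List String :=
  ["#FPCHECKER: Warning at dot_product.cu:6",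
   "#FPCHECKER: Warning at dot_product.cu:8",
   "#FPCHECKER: Warning at dot_product.cu:18"]

def checkForErrorReports_alt (out_ : List String) : Bool :=
  pvTargets.all (fun t => out_.any (fun l => PySem.Str.isIn t l))

-- ===== PRECONDITION & SPEC =====
def Spec_checkForErrorReports (out_ : List String) (out : Bool) : Prop := out = checkForErrorReports_alt out_
instance (out_ : List String) (out : Bool) : Decidable (Spec_checkForErrorReports out_ out) := by unfold Spec_checkForErrorReports; infer_instance

-- ===== CLAIM (what is proved, stated in full; the proofs are below) =====
def Claim_equal_checkForErrorReports : Prop := ∀ (out_ : List String), Dom_checkForErrorReports out_ → Spec_checkForErrorReports out_ (checkForErrorReports out_)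

-- ===== LEMMAS AND PROOFS =====

lemma fold_char {p q r : String → Bool} (out_ : List String) (a b c : Bool) :
    out_.foldl
      (fun (st : Bool × Bool × Bool) l =>
        let st := if p l then (true, st.2.1, st.2.2) else st
        let st := if q l then (st.1, true, st.2.2) else st
        let st := if r l then (st.1, st.2.1, true) else st
        st) (a, b, c)
    = (a || out_.any p, b || out_.any q, c || out_.any r) := by
  induction out_ generalizing a b c with
  | nil => simp
  | cons h t ih =>
    simp only [List.foldl_cons, List.any_cons]
    cases hp : p h <;> cases hq : q h <;> cases hr : r h <;>
      simp [ih]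

-- ===== VERDICT (by name: the statement is the Claim_ definition above) =====
theorem checkForErrorReports_spec : Claim_equal_checkForErrorReports := by
  intro out_ _
  unfold Spec_checkForErrorReports checkForErrorReports checkForErrorReports_alt pvTargets
  rw [fold_char]
  simp only [List.all_cons, List.all_nil, Bool.and_true, Bool.false_or, Bool.and_assoc]
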